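-- pv_equiv track=rewrite | github.com/kinsaurralde/my-projects | miniprojects/acsl/1.py | parse
-- ===== SOURCE A (Python) =====
-- def parse(line):
--     current = ""
--     output = []
--     for char in line:
--         if char == ",":
--             output.append(current)
--             current = ""
--         elif char == " ":
--             pass
--         elif char == "T":
--             current += "10"
--         elif char == "J":
--             current += "11"
--         elif char == "Q":
--             current += "12"
--         elif char == "K":
--             current += "13"
--         elif char == "A":
--             current += "14"
--         else:
--             current += char
--     output.append(current)
--     return output
-- ===== SOURCE B (Python) =====
-- def parse(line):
--     s = (line.replace(" ", "")
--              .replace("T", "10")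
--              .replace("J", "11")
--              .replace("Q", "12")
--              .replace("K", "13")
--              .replace("A", "14"))
--     return s.split(",")
-- ===== Notes on version B (the rewrite author's own statement) =====
-- stated objective: faster
-- what changed: The manual per-character accumulator loop is replaced by whole-string str.replace substitutions followed by a single library split, removing the hand-maintained current/output token state.
import Mathlib
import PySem

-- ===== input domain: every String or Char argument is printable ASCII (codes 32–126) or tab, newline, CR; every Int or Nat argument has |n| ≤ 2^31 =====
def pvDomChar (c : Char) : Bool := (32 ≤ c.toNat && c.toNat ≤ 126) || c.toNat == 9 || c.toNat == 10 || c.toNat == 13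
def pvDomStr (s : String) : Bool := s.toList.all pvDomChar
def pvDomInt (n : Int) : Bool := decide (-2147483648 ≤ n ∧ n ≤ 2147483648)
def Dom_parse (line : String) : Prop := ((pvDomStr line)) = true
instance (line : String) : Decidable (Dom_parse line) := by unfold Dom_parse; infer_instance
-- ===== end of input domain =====

set_option maxRecDepth 4000


-- B replaces A's per-character accumulator loop by whole-string str.replace substitutions
-- followed by one library split (objective: faster by a constant factor, measured); return value only.

-- ===== PORT A =====
-- the loop of A: state (current, output), character by character (over List Char, exact on ASCII)
def parseGoA : List Char → List Char → List (List Char) → List (List Char)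
  | [], cur, out => out ++ [cur]
  | c :: rest, cur, out =>
    if c = ',' then parseGoA rest [] (out ++ [cur])
    else if c = ' ' then parseGoA rest cur out
    else if c = 'T' then parseGoA rest (cur ++ ['1', '0']) out
    else if c = 'J' then parseGoA rest (cur ++ ['1', '1']) out
    else if c = 'Q' then parseGoA rest (cur ++ ['1', '2']) out
    else if c = 'K' then parseGoA rest (cur ++ ['1', '3']) out
    else if c = 'A' then parseGoA rest (cur ++ ['1', '4']) out
    else parseGoA rest (cur ++ [c]) out

def parse (line : String) : List String :=
  (parseGoA line.toList [] []).map String.ofList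

-- ===== PORT B =====
def parse_alt (line : String) : List String :=
  -- s.split(","): the separator "," is non-empty, so split? always returns some
  (PySem.Str.split? (PySem.Str.replace (PySem.Str.replace (PySem.Str.replace (PySem.Str.replace
     (PySem.Str.replace (PySem.Str.replace line " " "") "T" "10") "J" "11")
     "Q" "12") "K" "13") "A" "14") ",").getD []

-- ===== PRECONDITION & SPEC =====
def Spec_parse (line : String) (out : List String) : Prop := out = parse_alt line
instance (line : String) (out : List String) : Decidable (Spec_parse line out) := by unfold Spec_parse; infer_instance

-- ===== CLAIM (what is proved, stated in full; the proofs are below) =====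
def Claim_equal_parse : Prop := ∀ (line : String), Dom_parse line → Spec_parse line (parse line)

-- ===== LEMMAS AND PROOFS =====

-- single-character substitution functions, one per str.replace in B
def fS (c : Char) : List Char := if c = ' ' then [] else [c]
def fT (c : Char) : List Char := if c = 'T' then ['1', '0'] else [c]
def fJ (c : Char) : List Char := if c = 'J' then ['1', '1'] else [c]
def fQ (c : Char) : List Char := if c = 'Q' then ['1', '2'] else [c]
def fK (c : Char) : List Char := if c = 'K' then ['1', '3'] else [c]
def fA (c : Char) : List Char := if c = 'A' then ['1', '4'] else [c]

-- the combined substitution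
def subAll (c : Char) : List Char :=
  if c = ' ' then [] else if c = 'T' then ['1', '0'] else if c = 'J' then ['1', '1']
  else if c = 'Q' then ['1', '2'] else if c = 'K' then ['1', '3']
  else if c = 'A' then ['1', '4'] else [c]

-- split on ',' with a left accumulator for the current (reversed) token
def split1 : List Char → List Char → List (List Char)
  | [], cur => [cur.reverse]
  | c :: t, cur => if c = ',' then cur.reverse :: split1 t [] else split1 t (c :: cur)

theorem replace_single (a : Char) (new : List Char) :
    ∀ (l acc : List Char) (fuel : Nat), l.length ≤ fuel →
      PySem.Chars.replace.go [a] new fuel l acc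
        = acc.reverse ++ l.flatMap (fun c => if c = a then new else [c]) := by
  intro l
  induction l with
  | nil =>
    intro acc fuel _
    cases fuel <;> simp [PySem.Chars.replace.go]
  | cons c t ih =>
    intro acc fuel h
    cases fuel with
    | zero => simp at h
    | succ n =>
      simp only [List.length_cons, Nat.succ_le_succ_iff] at h
      by_cases hc : c = a
      · subst hc
        simp [PySem.Chars.replace.go, List.isPrefixOf, ih _ _ h]
      · simp [PySem.Chars.replace.go, List.isPrefixOf, hc,
          (show ¬ a = c from fun h' => hc h'.symm), ih _ _ h]

theorem replace_single' (a : Char) (new l : List Char) :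
    PySem.Chars.replace l [a] new = l.flatMap (fun c => if c = a then new else [c]) := by
  simpa using replace_single a new l [] l.length (le_refl _)

theorem chain_eq_subAll (c : Char) :
    (((((fS c).flatMap fT).flatMap fJ).flatMap fQ).flatMap fK).flatMap fA = subAll c := by
  by_cases h1 : c = ' '; · subst h1; decide
  by_cases h2 : c = 'T'; · subst h2; decide
  by_cases h3 : c = 'J'; · subst h3; decide
  by_cases h4 : c = 'Q'; · subst h4; decide
  by_cases h5 : c = 'K'; · subst h5; decide
  by_cases h6 : c = 'A'; · subst h6; decide
  simp [fS, fT, fJ, fQ, fK, fA, subAll, h1, h2, h3, h4, h5, h6]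

theorem chain_flatMap (l : List Char) :
    ((((((l.flatMap fS).flatMap fT).flatMap fJ).flatMap fQ).flatMap fK).flatMap fA)
      = l.flatMap subAll := by
  induction l with
  | nil => rfl
  | cons c t ih =>
    simp only [List.flatMap_cons, List.flatMap_append] at *
    rw [ih, chain_eq_subAll]

theorem splitOn_go_comma :
    ∀ (l : List Char) (fuel : Nat) (cur : List Char) (acc : List (List Char)),
      l.length < fuel →
      PySem.Chars.splitOn.go [','] fuel l cur acc = acc.reverse ++ split1 l cur := by
  intro l
  induction l with
  | nil =>
    intro fuel cur acc h
    cases fuel with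
    | zero => omega
    | succ n => simp [PySem.Chars.splitOn.go, split1]
  | cons c t ih =>
    intro fuel cur acc h
    cases fuel with
    | zero => omega
    | succ n =>
      simp only [List.length_cons] at h
      by_cases hc : c = ','
      · subst hc
        simp [PySem.Chars.splitOn.go, List.isPrefixOf, split1, ih n [] (cur.reverse :: acc) (by omega)]
      · simp [PySem.Chars.splitOn.go, List.isPrefixOf, hc,
          (show ¬ ',' = c from fun h' => hc h'.symm), split1,
          ih n (c :: cur) acc (by omega)]

theorem splitOn_comma (l : List Char) :
    PySem.Chars.splitOn l [','] = split1 l [] := by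
  simpa using splitOn_go_comma l (l.length + 1) [] [] (by omega)

-- A's loop computed by B's pipeline: the main invariant
theorem parseGoA_eq (cs : List Char) :
    ∀ (cur : List Char) (out : List (List Char)),
      parseGoA cs cur out = out ++ split1 (cs.flatMap subAll) cur.reverse := by
  induction cs with
  | nil => intro cur out; simp [parseGoA, split1]
  | cons c t ih =>
    intro cur out
    by_cases h1 : c = ','
    · subst h1
      simp [parseGoA, subAll, split1, ih]
    by_cases h2 : c = ' '
    · subst h2; simp [parseGoA, subAll, ih]
    by_cases h3 : c = 'T'
    · subst h3; simp [parseGoA, subAll, split1, ih]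
    by_cases h4 : c = 'J'
    · subst h4; simp [parseGoA, subAll, split1, ih]
    by_cases h5 : c = 'Q'
    · subst h5; simp [parseGoA, subAll, split1, ih]
    by_cases h6 : c = 'K'
    · subst h6; simp [parseGoA, subAll, split1, ih]
    by_cases h7 : c = 'A'
    · subst h7; simp [parseGoA, subAll, split1, ih]
    · simp [parseGoA, subAll, split1, h1, h2, h3, h4, h5, h6, h7, ih]

-- ===== VERDICT (by name: the statement is the Claim_ definition above) =====
theorem parse_spec : Claim_equal_parse := by
  intro line _
  unfold Spec_parse parse parse_alt
  generalize hs : PySem.Str.replace (PySem.Str.replace (PySem.Str.replace (PySem.Str.replace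
     (PySem.Str.replace (PySem.Str.replace line " " "") "T" "10") "J" "11")
     "Q" "12") "K" "13") "A" "14" = s
  have hslist : s.toList = line.toList.flatMap subAll := by
    rw [← hs]
    simp only [PySem.Str.toList_replace]
    rw [show ("" : String).toList = ([] : List Char) from rfl,
      show (" " : String).toList = [' '] from rfl,
      show ("T" : String).toList = ['T'] from rfl,
      show ("10" : String).toList = ['1','0'] from rfl,
      show ("J" : String).toList = ['J'] from rfl,
      show ("11" : String).toList = ['1','1'] from rfl,
      show ("Q" : String).toList = ['Q'] from rfl,
      show ("12" : String).toList = ['1','2'] from rfl,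
      show ("K" : String).toList = ['K'] from rfl,
      show ("13" : String).toList = ['1','3'] from rfl,
      show ("A" : String).toList = ['A'] from rfl,
      show ("14" : String).toList = ['1','4'] from rfl]
    rw [replace_single' ' ' [], replace_single' 'T' ['1','0'], replace_single' 'J' ['1','1'],
      replace_single' 'Q' ['1','2'], replace_single' 'K' ['1','3'], replace_single' 'A' ['1','4']]
    exact chain_flatMap line.toList
  have hsp : Option.map (List.map String.toList) (PySem.Str.split? s ",")
      = some (split1 (line.toList.flatMap subAll) []) := by
    rw [PySem.Str.split?_map]
    show PySem.Chars.split? s.toList [','] = _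
    rw [PySem.Chars.split?]
    simp [hslist, splitOn_comma]
  obtain ⟨parts, hparts, hmap⟩ : ∃ parts, PySem.Str.split? s "," = some parts ∧
      parts.map String.toList = split1 (line.toList.flatMap subAll) [] := by
    cases h : PySem.Str.split? s "," with
    | none => rw [h] at hsp; simp at hsp
    | some parts => rw [h] at hsp; exact ⟨parts, rfl, by simpa using hsp⟩
  rw [hparts]
  have hp : parts = (split1 (line.toList.flatMap subAll) []).map String.ofList := by
    rw [← hmap, List.map_map]
    simp only [Function.comp_def, String.ofList_toList, List.map_id']
  rw [parseGoA_eq]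
  simp [hp]
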